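-- pv_equiv track=rewrite | github.com/fleissigal/CrackingTheCodingInterview | Chapter5-3.py | flipBitToWin
-- ===== SOURCE A (Python) =====
-- def flipBitToWin(num):
--     zeroFlag = False
--     for i in num:
--         if i == '0':
--             zeroFlag = True
--     if zeroFlag is False:
--         return len(num)
--     else:
--         num = num + "00"
--
--         result = 0
--         prevOnes = 0
--         currOnes = 0
--         zeroFlag = False
--
--         for i in num:
--             if i == '1':
--                 currOnes += 1
--                 zeroFlag = False
--             else:
--                 if zeroFlag is False:
--                     if prevOnes > 0 and currOnes > 0:
--                         sum = prevOnes + currOnes + 1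
--                         if result < sum:
--                             result = sum
--                     prevOnes = currOnes
--                     currOnes = 0
--                     zeroFlag = True
--                 else:
--                     if result < prevOnes + 1:
--                         result = prevOnes + 1
--                     prevOnes = 0
--                     currOnes = 0
--         return result
-- ===== SOURCE B (Python) =====
-- def flipBitToWin(num):
--     if '0' not in num:
--         return len(num)
--     # one-pass DP: a = ones ending here, b = best window with <=1 flip ending here
--     a = 0
--     b = 0
--     best = 0
--     for c in num:
--         if c == '1':
--             a += 1
--             b += 1
--         else:
--             b = a + 1
--             a = 0
--         if best < b:
--             best = b
--     return best
-- ===== Notes on version B (the rewrite author's own statement) =====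
-- stated objective: simpler
-- what changed: Replaces A's run-pair state machine (prevOnes/currOnes/zeroFlag over num+'00' with a sentinel flush) by the standard one-pass DP tracking the ones-run ending here and the best <=1-flip window ending here, no sentinel append and no flag.
import Mathlib
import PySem

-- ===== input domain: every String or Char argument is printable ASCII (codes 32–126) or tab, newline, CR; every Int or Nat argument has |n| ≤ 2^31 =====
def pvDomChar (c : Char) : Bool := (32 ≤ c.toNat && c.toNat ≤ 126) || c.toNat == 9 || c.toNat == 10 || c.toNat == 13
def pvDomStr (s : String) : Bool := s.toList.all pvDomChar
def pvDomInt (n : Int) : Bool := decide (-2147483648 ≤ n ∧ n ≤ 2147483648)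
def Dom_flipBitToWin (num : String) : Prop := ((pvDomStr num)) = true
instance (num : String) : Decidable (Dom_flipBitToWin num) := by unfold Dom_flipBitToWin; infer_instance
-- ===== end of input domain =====

-- B replaces A's run-pair state machine (with the "00" sentinel append) by the standard
-- one-pass <=1-flip DP: simpler, same O(n) cost.

-- ===== PORT A =====
-- state: (result, prevOnes, currOnes, zeroFlag), exactly A's loop body
def flipBitToWin_loopA (st : Int × Int × Int × Bool) (c : Char) : Int × Int × Int × Bool :=
  let (result, prevOnes, currOnes, zeroFlag) := st
  if c = '1' then (result, prevOnes, currOnes + 1, false)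
  else if zeroFlag = false then
    (if prevOnes > 0 ∧ currOnes > 0 then
       (if result < prevOnes + currOnes + 1 then prevOnes + currOnes + 1 else result)
     else result, currOnes, 0, true)
  else
    ((if result < prevOnes + 1 then prevOnes + 1 else result), 0, 0, zeroFlag)

def flipBitToWin (num : String) : Int :=
  -- first loop: zeroFlag = True iff some char equals '0'
  let zeroFlag := num.toList.foldl (fun f c => if c = '0' then true else f) false
  if zeroFlag = false then PySem.Str.len num
  else
    -- num = num + "00" : fold over the char list with "00" appended
    ((num.toList ++ ['0', '0']).foldl flipBitToWin_loopA (0, 0, 0, false)).1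

-- ===== PORT B =====
-- state: (a, b, best) = (ones run ending here, best <=1-flip window ending here, max so far)
def flipBitToWin_loopB (st : Int × Int × Int) (c : Char) : Int × Int × Int :=
  let (a, b, best) := st
  let (a, b) := if c = '1' then (a + 1, b + 1) else ((0 : Int), a + 1)
  (a, b, if best < b then b else best)

def flipBitToWin_alt (num : String) : Int :=
  if ¬ ('0' ∈ num.toList) then PySem.Str.len num
  else (num.toList.foldl flipBitToWin_loopB (0, 0, 0)).2.2

-- ===== PRECONDITION & SPEC =====
def Spec_flipBitToWin (num : String) (out : Int) : Prop := out = flipBitToWin_alt num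
instance (num : String) (out : Int) : Decidable (Spec_flipBitToWin num out) := by unfold Spec_flipBitToWin; infer_instance

-- ===== CLAIM (what is proved, stated in full; the proofs are below) =====
def Claim_equal_flipBitToWin : Prop := ∀ (num : String), Dom_flipBitToWin num → Spec_flipBitToWin num (flipBitToWin num)

-- ===== LEMMAS AND PROOFS =====

-- the first loop of A computes membership of '0'
theorem flipBitToWin_zeroFold (l : List Char) (b : Bool) :
    l.foldl (fun f c => if c = '0' then true else f) b = (b || decide ('0' ∈ l)) := by
  induction l generalizing b with
  | nil => simp
  | cons c l ih =>
      by_cases hc : c = '0'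
      · subst hc
        simp only [List.foldl_cons, if_true]
        rw [ih true]
        simp
      · simp only [List.foldl_cons, if_neg hc]
        rw [ih b]
        simp [show ¬ ('0' : Char) = c from fun h => hc h.symm]

-- main invariant: once a non-'1' char has been processed, A's state (res, prev, curr, flag)
-- corresponds to B's state (curr, prev + curr + 1, max res (prev + curr + 1)), and the
-- appended "00" flushes A's pending window into res.
theorem flipBitToWin_loop_eq (l : List Char) :
    ∀ (res prev curr : Int) (flag : Bool),
    0 ≤ res → 0 ≤ prev → 0 ≤ curr →
    (flag = true → curr = 0) → (flag = false → 0 < curr ∨ prev = 0) →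
    ((l ++ ['0', '0']).foldl flipBitToWin_loopA (res, prev, curr, flag)).1
      = (l.foldl flipBitToWin_loopB (curr, prev + curr + 1, max res (prev + curr + 1))).2.2 := by
  induction l with
  | nil =>
      intro res prev curr flag hres hprev hcurr ht hf
      cases flag with
      | true =>
          have hc0 : curr = 0 := ht rfl
          subst hc0
          simp [flipBitToWin_loopA]
          split_ifs <;> omega
      | false =>
          have hcp : 0 < curr ∨ prev = 0 := hf rfl
          simp [flipBitToWin_loopA]
          split_ifs <;> omega
  | cons c l ih =>
      intro res prev curr flag hres hprev hcurr ht hf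
      simp only [List.cons_append, List.foldl_cons]
      by_cases hc : c = '1'
      · have hA : flipBitToWin_loopA (res, prev, curr, flag) c = (res, prev, curr + 1, false) := by
          simp [flipBitToWin_loopA, hc]
        have hB : flipBitToWin_loopB (curr, prev + curr + 1, max res (prev + curr + 1)) c
            = (curr + 1, prev + (curr + 1) + 1, max res (prev + (curr + 1) + 1)) := by
          simp [flipBitToWin_loopB, hc]
          constructor
          · ring
          · split_ifs <;> omega
        rw [hA, hB, ih res prev (curr + 1) false hres hprev (by omega) (by simp) (by intro; left; omega)]
      · -- c is treated as a zero
        cases flag with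
        | true =>
            have hc0 : curr = 0 := ht rfl
            subst hc0
            have hA : flipBitToWin_loopA (res, prev, 0, true) c
                = ((if res < prev + 1 then prev + 1 else res), 0, 0, true) := by
              simp [flipBitToWin_loopA, hc]
            have hB : flipBitToWin_loopB (0, prev + 0 + 1, max res (prev + 0 + 1)) c
                = (0, 0 + 0 + 1, max (if res < prev + 1 then prev + 1 else res) (0 + 0 + 1)) := by
              simp [flipBitToWin_loopB, hc]
              split_ifs <;> omega
            rw [hA, hB, ih (if res < prev + 1 then prev + 1 else res) 0 0 true
                (by split_ifs <;> omega) le_rfl le_rfl (fun _ => rfl) (by simp)]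
        | false =>
            have hcp : 0 < curr ∨ prev = 0 := hf rfl
            have hA : flipBitToWin_loopA (res, prev, curr, false) c
                = ((if prev > 0 ∧ curr > 0 then
                      (if res < prev + curr + 1 then prev + curr + 1 else res)
                    else res), curr, 0, true) := by
              simp [flipBitToWin_loopA, hc]
            have hB : flipBitToWin_loopB (curr, prev + curr + 1, max res (prev + curr + 1)) c
                = (0, curr + 0 + 1,
                   max (if prev > 0 ∧ curr > 0 then
                          (if res < prev + curr + 1 then prev + curr + 1 else res)
                        else res) (curr + 0 + 1)) := by
              simp [flipBitToWin_loopB, hc]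
              split_ifs <;> omega
            rw [hA, hB, ih (if prev > 0 ∧ curr > 0 then
                      (if res < prev + curr + 1 then prev + curr + 1 else res)
                    else res) curr 0 true (by split_ifs <;> omega) hcurr le_rfl
                (fun _ => rfl) (by simp)]

-- the leading all-'1' phase: both loops just count ones, until the first non-'1' char
theorem flipBitToWin_pre_phase (l : List Char) :
    ∀ k : Int, 0 ≤ k → '0' ∈ l →
    ((l ++ ['0', '0']).foldl flipBitToWin_loopA (0, 0, k, false)).1
      = (l.foldl flipBitToWin_loopB (k, k, k)).2.2 := by
  induction l with
  | nil => intro k _ h; simp at h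
  | cons c l ih =>
      intro k hk hmem
      simp only [List.cons_append, List.foldl_cons]
      by_cases hc : c = '1'
      · have hmem' : '0' ∈ l := by
          rcases List.mem_cons.mp hmem with h | h
          · exact absurd h.symm (by simp [hc])
          · exact h
        have hA : flipBitToWin_loopA (0, 0, k, false) c = (0, 0, k + 1, false) := by
          simp [flipBitToWin_loopA, hc]
        have hB : flipBitToWin_loopB (k, k, k) c = (k + 1, k + 1, k + 1) := by
          simp [flipBitToWin_loopB, hc]
        rw [hA, hB, ih (k + 1) (by omega) hmem']
      · have hA : flipBitToWin_loopA (0, 0, k, false) c = (0, k, 0, true) := by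
          simp [flipBitToWin_loopA, hc]
        have hB : flipBitToWin_loopB (k, k, k) c = (0, k + 1, k + 1) := by
          simp [flipBitToWin_loopB, hc]
        rw [hA, hB, flipBitToWin_loop_eq l 0 k 0 true le_rfl hk le_rfl (fun _ => rfl) (by simp)]
        have h2 : max (0 : Int) (k + 0 + 1) = k + 1 := by omega
        rw [h2]
        norm_num

-- ===== VERDICT (by name: the statement is the Claim_ definition above) =====
theorem flipBitToWin_spec : Claim_equal_flipBitToWin := by
  intro num _
  unfold Spec_flipBitToWin flipBitToWin flipBitToWin_alt
  rw [flipBitToWin_zeroFold]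
  by_cases h : '0' ∈ num.toList
  · simp only [h, decide_true, Bool.or_true]
    rw [if_neg (by simp), if_neg (by simp)]
    exact flipBitToWin_pre_phase num.toList 0 le_rfl h
  · simp [h]
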